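-- pv_equiv track=rewrite | github.com/joaoperfig/mikezart | source/mikezario.py | maxComScore
-- ===== SOURCE A (Python) =====
-- def maxComScore(sent1, sent2):
--     if len(sent1) == 0 or len(sent2) == 0:
--         return 0
--     l = longestComSub(sent1, sent2)
--     if len(l) == 0:
--         return 0
--     i1 = sent1.index(l)
--     i2 = sent2.index(l)
--     first1 = sent1[:i1]
--     first2 = sent2[:i2]
--     second1 = sent1[i1+len(l):]
--     second2 = sent2[i2+len(l):]
--     return len(l) + maxComScore(first1, first2) + maxComScore(second1, second2)
--
-- def longestComSub(s1, s2): #not my stuff, got it online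
--     m = [[0] * (1 + len(s2)) for i in range(1 + len(s1))]
--     longest, x_longest = 0, 0
--     for x in range(1, 1 + len(s1)):
--         for y in range(1, 1 + len(s2)):
--             if s1[x - 1] == s2[y - 1]:
--                 m[x][y] = m[x - 1][y - 1] + 1
--                 if m[x][y] > longest:
--                     longest = m[x][y]
--                     x_longest = x
--             else:
--                 m[x][y] = 0
--     return s1[x_longest - longest: x_longest]
-- ===== SOURCE B (Python) =====
-- def maxComScore(sent1, sent2):
--     total = 0
--     stack = [(sent1, sent2)]
--     while stack:
--         a, b = stack.pop()
--         if not a or not b: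
--             continue
--         l = longestComSub(a, b)
--         if not l:
--             continue
--         i1 = a.index(l)
--         i2 = b.index(l)
--         total += len(l)
--         stack.append((a[:i1], b[:i2]))
--         stack.append((a[i1 + len(l):], b[i2 + len(l):]))
--     return total
--
-- def longestComSub(s1, s2): #not my stuff, got it online
--     m = [[0] * (1 + len(s2)) for i in range(1 + len(s1))]
--     longest, x_longest = 0, 0
--     for x in range(1, 1 + len(s1)):
--         for y in range(1, 1 + len(s2)):
--             if s1[x - 1] == s2[y - 1]:
--                 m[x][y] = m[x - 1][y - 1] + 1
--                 if m[x][y] > longest: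
--                     longest = m[x][y]
--                     x_longest = x
--             else:
--                 m[x][y] = 0
--     return s1[x_longest - longest: x_longest]
-- ===== Notes on version B (the rewrite author's own statement) =====
-- stated objective: alternative
-- what changed: Replaces the two-way tree recursion with an iterative worklist: an explicit stack of (substring, substring) pairs and a running total, popping a pair, scoring its longest common substring and pushing the two surrounding pairs; longestComSub is unchanged.
import Mathlib
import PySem

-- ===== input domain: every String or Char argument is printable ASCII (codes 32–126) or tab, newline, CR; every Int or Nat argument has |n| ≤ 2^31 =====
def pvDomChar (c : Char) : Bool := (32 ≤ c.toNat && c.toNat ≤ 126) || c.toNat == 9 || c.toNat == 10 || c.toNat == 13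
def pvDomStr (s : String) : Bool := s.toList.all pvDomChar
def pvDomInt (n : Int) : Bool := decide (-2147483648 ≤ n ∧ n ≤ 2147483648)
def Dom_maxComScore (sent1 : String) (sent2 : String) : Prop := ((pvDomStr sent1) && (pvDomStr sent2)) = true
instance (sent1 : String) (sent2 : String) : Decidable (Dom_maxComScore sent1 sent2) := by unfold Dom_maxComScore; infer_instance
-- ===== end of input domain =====

-- B rewrites A's two-way tree recursion as an iterative worklist: an explicit stack of
-- substring pairs and a running total (same subproblems, no recursion); longestComSub is
-- shared unchanged (objective: alternative, not faster).

-- ===== PORT A =====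

-- shared helper: literal transliteration of longestComSub (DP matrix m, longest, x_longest)
def longestComSub (s1 : List Char) (s2 : List Char) : List Char :=
  let m0 : List (List Int) := List.replicate (1 + s1.length) (List.replicate (1 + s2.length) (0 : Int))
  let st :=
    (PySem.List.pyRange 1 (1 + (s1.length : Int)) 1).foldl (fun st x =>
      (PySem.List.pyRange 1 (1 + (s2.length : Int)) 1).foldl (fun st y =>
        let m := st.1
        let longest := st.2.1
        let x_longest := st.2.2
        if PySem.List.pyGetD s1 (x - 1) 'A' = PySem.List.pyGetD s2 (y - 1) 'A' then
          -- m[x][y] = m[x-1][y-1] + 1  (indices always in range here)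
          let v := PySem.List.pyGetD (PySem.List.pyGetD m (x - 1) []) (y - 1) 0 + 1
          let m := PySem.List.pySetD m x (PySem.List.pySetD (PySem.List.pyGetD m x []) y v)
          if v > longest then (m, v, x) else (m, longest, x_longest)
        else
          (PySem.List.pySetD m x (PySem.List.pySetD (PySem.List.pyGetD m x []) y 0), longest, x_longest))
        st)
      (m0, (0 : Int), (0 : Int))
  PySem.List.slice s1 (some (st.2.2 - st.2.1)) (some st.2.2)

-- recursion of A over the character lists, made structural with a fuel argument
-- (fuel only makes the recursion total: level sum strictly drops, see scoreGo_fuel below);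
-- sent.index(l) is PySem.Chars.find (the '0 ≤ find' guard is unreachable: l occurs in both)
def scoreGo : Nat → List Char → List Char → Int
  | 0, _, _ => 0
  | fuel + 1, s1, s2 =>
    if s1.length = 0 ∨ s2.length = 0 then 0
    else if (longestComSub s1 s2).length = 0 then 0
    else if 0 ≤ PySem.Chars.find s1 (longestComSub s1 s2)
            ∧ 0 ≤ PySem.Chars.find s2 (longestComSub s1 s2) then
      ((longestComSub s1 s2).length : Int)
        + scoreGo fuel (s1.take (PySem.Chars.find s1 (longestComSub s1 s2)).toNat)
            (s2.take (PySem.Chars.find s2 (longestComSub s1 s2)).toNat)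
        + scoreGo fuel
            (s1.drop ((PySem.Chars.find s1 (longestComSub s1 s2)).toNat + (longestComSub s1 s2).length))
            (s2.drop ((PySem.Chars.find s2 (longestComSub s1 s2)).toNat + (longestComSub s1 s2).length))
    else 0

def maxComScore (sent1 : String) (sent2 : String) : Int :=
  scoreGo (sent1.toList.length + sent2.toList.length + 1) sent1.toList sent2.toList

-- ===== PORT B =====

-- while stack: pop (a, b); skip empty pairs and pairs with empty LCS; otherwise add len(l)
-- to the total and push the two surrounding pairs. Fuel again only makes the loop total:
-- each iteration strictly shrinks the stack measure (see loopGo_eq below).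
def loopGo : Nat → List (List Char × List Char) → Int → Int
  | 0, _, total => total
  | _ + 1, [], total => total
  | fuel + 1, (a, b) :: rest, total =>
    if a.length = 0 ∨ b.length = 0 then loopGo fuel rest total
    else if (longestComSub a b).length = 0 then loopGo fuel rest total
    else if 0 ≤ PySem.Chars.find a (longestComSub a b)
            ∧ 0 ≤ PySem.Chars.find b (longestComSub a b) then
      loopGo fuel
        ((a.take (PySem.Chars.find a (longestComSub a b)).toNat,
          b.take (PySem.Chars.find b (longestComSub a b)).toNat)
          :: (a.drop ((PySem.Chars.find a (longestComSub a b)).toNat + (longestComSub a b).length),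
              b.drop ((PySem.Chars.find b (longestComSub a b)).toNat + (longestComSub a b).length))
          :: rest)
        (total + ((longestComSub a b).length : Int))
    else loopGo fuel rest total

def maxComScore_alt (sent1 : String) (sent2 : String) : Int :=
  loopGo (sent1.toList.length + sent2.toList.length + 1) [(sent1.toList, sent2.toList)] 0

-- ===== PRECONDITION & SPEC =====
def Spec_maxComScore (sent1 : String) (sent2 : String) (out : Int) : Prop := out = maxComScore_alt sent1 sent2
instance (sent1 : String) (sent2 : String) (out : Int) : Decidable (Spec_maxComScore sent1 sent2 out) := by unfold Spec_maxComScore; infer_instance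

-- ===== CLAIM (what is proved, stated in full; the proofs are below) =====
def Claim_equal_maxComScore : Prop := ∀ (sent1 : String) (sent2 : String), Dom_maxComScore sent1 sent2 → Spec_maxComScore sent1 sent2 (maxComScore sent1 sent2)

-- ===== LEMMAS AND PROOFS =====

-- s.index(l): where l is found (0 ≤ find), index + len l ≤ len s
theorem find_add_le (s l : List Char) (h : 0 ≤ PySem.Chars.find s l) :
    (PySem.Chars.find s l).toNat + l.length ≤ s.length := by
  obtain ⟨hp, -⟩ := PySem.Chars.find_spec (s := s) (sub := l) h
  have h1 := hp.length_le
  have h2 := PySem.Chars.find_le_length (s := s) (sub := l)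
  simp only [List.length_drop] at h1
  omega

-- the two pushed pairs are strictly smaller than the popped pair (sum of lengths)
theorem decTake (s1 s2 l : List Char) (hl : ¬l.length = 0)
    (h1 : 0 ≤ PySem.Chars.find s1 l) (h2 : 0 ≤ PySem.Chars.find s2 l) :
    (s1.take (PySem.Chars.find s1 l).toNat).length
      + (s2.take (PySem.Chars.find s2 l).toNat).length < s1.length + s2.length := by
  have a1 := find_add_le s1 l h1
  have a2 := find_add_le s2 l h2
  simp only [List.length_take]
  omega

theorem decDrop (s1 s2 l : List Char) (hl : ¬l.length = 0)
    (h1 : 0 ≤ PySem.Chars.find s1 l) (h2 : 0 ≤ PySem.Chars.find s2 l) :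
    (s1.drop ((PySem.Chars.find s1 l).toNat + l.length)).length
      + (s2.drop ((PySem.Chars.find s2 l).toNat + l.length)).length < s1.length + s2.length := by
  have a1 := find_add_le s1 l h1
  have a2 := find_add_le s2 l h2
  simp only [List.length_drop]
  omega

-- scoreGo does not depend on the fuel once the fuel exceeds the length sum
theorem scoreGo_fuel (f1 : Nat) (f2 : Nat) (s1 s2 : List Char)
    (h1 : s1.length + s2.length < f1) (h2 : s1.length + s2.length < f2) :
    scoreGo f1 s1 s2 = scoreGo f2 s1 s2 := by
  induction f1 generalizing f2 s1 s2 with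
  | zero => omega
  | succ f1 ih =>
    obtain ⟨g, rfl⟩ : ∃ g, f2 = g + 1 := ⟨f2 - 1, by omega⟩
    rw [scoreGo, scoreGo]
    by_cases he : s1.length = 0 ∨ s2.length = 0
    · rw [if_pos he, if_pos he]
    · rw [if_neg he, if_neg he]
      by_cases hl : (longestComSub s1 s2).length = 0
      · rw [if_pos hl, if_pos hl]
      · rw [if_neg hl, if_neg hl]
        by_cases hf : 0 ≤ PySem.Chars.find s1 (longestComSub s1 s2)
            ∧ 0 ≤ PySem.Chars.find s2 (longestComSub s1 s2)
        · rw [if_pos hf, if_pos hf]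
          have dt := decTake s1 s2 (longestComSub s1 s2) hl hf.1 hf.2
          have dd := decDrop s1 s2 (longestComSub s1 s2) hl hf.1 hf.2
          rw [ih g _ _ (by omega) (by omega), ih g _ _ (by omega) (by omega)]
        · rw [if_neg hf, if_neg hf]

-- the canonical score of one pair, with just enough fuel
def score1 (a : List Char) (b : List Char) : Int := scoreGo (a.length + b.length + 1) a b

-- measure of a worklist: an upper bound on the number of loop iterations it can cause
def stackMeasure (st : List (List Char × List Char)) : Nat :=
  (st.map (fun p => p.1.length + p.2.length + 1)).sum

theorem decSkip (a b : List Char) (rest : List (List Char × List Char)) :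
    stackMeasure rest < stackMeasure ((a, b) :: rest) := by
  simp only [stackMeasure, List.map_cons, List.sum_cons]
  omega

theorem decPush (a b : List Char) (rest : List (List Char × List Char)) (l : List Char)
    (hl : ¬l.length = 0) (h1 : 0 ≤ PySem.Chars.find a l) (h2 : 0 ≤ PySem.Chars.find b l) :
    stackMeasure ((a.take (PySem.Chars.find a l).toNat, b.take (PySem.Chars.find b l).toNat)
        :: (a.drop ((PySem.Chars.find a l).toNat + l.length),
            b.drop ((PySem.Chars.find b l).toNat + l.length)) :: rest)
      < stackMeasure ((a, b) :: rest) := by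
  have a1 := find_add_le a l h1
  have a2 := find_add_le b l h2
  simp only [stackMeasure, List.map_cons, List.sum_cons, List.length_take, List.length_drop]
  omega

-- loop invariant: with enough fuel the worklist loop returns total plus the score of
-- every pending pair
theorem loopGo_eq (fuel : Nat) (st : List (List Char × List Char)) (total : Int)
    (hf : stackMeasure st ≤ fuel) :
    loopGo fuel st total = total + (st.map (fun p => score1 p.1 p.2)).sum := by
  induction fuel generalizing st total with
  | zero =>
    have : st = [] := by
      cases st with
      | nil => rfl
      | cons p rest => simp [stackMeasure] at hf
    subst this
    simp [loopGo]
  | succ fuel ih =>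
    cases st with
    | nil => simp [loopGo]
    | cons p rest =>
      obtain ⟨a, b⟩ := p
      have hsk := decSkip a b rest
      rw [loopGo, List.map_cons, List.sum_cons]
      have hS : score1 a b = scoreGo (a.length + b.length + 1) a b := rfl
      rw [scoreGo] at hS
      by_cases he : a.length = 0 ∨ b.length = 0
      · rw [if_pos he] at hS
        rw [if_pos he, ih rest total (by omega), hS]
        ring
      · rw [if_neg he] at hS
        rw [if_neg he]
        by_cases hl : (longestComSub a b).length = 0
        · rw [if_pos hl] at hS
          rw [if_pos hl, ih rest total (by omega), hS]
          ring
        · rw [if_neg hl] at hS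
          rw [if_neg hl]
          by_cases hfind : 0 ≤ PySem.Chars.find a (longestComSub a b)
              ∧ 0 ≤ PySem.Chars.find b (longestComSub a b)
          · rw [if_pos hfind] at hS
            rw [if_pos hfind]
            have dt := decTake a b (longestComSub a b) hl hfind.1 hfind.2
            have dd := decDrop a b (longestComSub a b) hl hfind.1 hfind.2
            have hp := decPush a b rest (longestComSub a b) hl hfind.1 hfind.2
            rw [scoreGo_fuel (a.length + b.length)
                  ((List.take (PySem.Chars.find a (longestComSub a b)).toNat a).length
                    + (List.take (PySem.Chars.find b (longestComSub a b)).toNat b).length + 1)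
                  _ _ (by omega) (by omega),
                scoreGo_fuel (a.length + b.length)
                  ((List.drop ((PySem.Chars.find a (longestComSub a b)).toNat + (longestComSub a b).length) a).length
                    + (List.drop ((PySem.Chars.find b (longestComSub a b)).toNat + (longestComSub a b).length) b).length + 1)
                  _ _ (by omega) (by omega)] at hS
            rw [ih _ _ (by omega)]
            rw [List.map_cons, List.sum_cons, List.map_cons, List.sum_cons, hS]
            unfold score1
            ring
          · rw [if_neg hfind] at hS
            rw [if_neg hfind, ih rest total (by omega), hS]
            ring

-- ===== VERDICT (by name: the statement is the Claim_ definition above) =====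
theorem maxComScore_spec : Claim_equal_maxComScore := by
  intro s1 s2 _
  unfold Spec_maxComScore maxComScore maxComScore_alt
  rw [loopGo_eq _ _ _ (by simp [stackMeasure])]
  simp [score1]
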